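-- pv_equiv track=rewrite | github.com/hyunlord/Godot-Test-MCP | scripts/verify_nl_runtime.py | _aggregate_gate_status
-- ===== SOURCE A (Python) =====
-- def _aggregate_gate_status(statuses: list[str]) -> str:
--     """Aggregate check statuses into a single scenario result."""
--     if any(status == "ERROR" for status in statuses):
--         return "ERROR"
--     if any(status == "FAIL" for status in statuses):
--         return "FAIL"
--     if any(status == "UNDETERMINED" for status in statuses):
--         return "UNDETERMINED"
--     return "PASS"
-- ===== SOURCE B (Python) =====
-- _RANK = {"ERROR": 3, "FAIL": 2, "UNDETERMINED": 1}
-- _NAME = ["PASS", "UNDETERMINED", "FAIL", "ERROR"]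
--
-- def _aggregate_gate_status(statuses: list[str]) -> str:
--     """Aggregate check statuses into a single scenario result."""
--     best = 0
--     for s in statuses:
--         best = max(best, _RANK.get(s, 0))
--     return _NAME[best]
-- ===== Notes on version B (the rewrite author's own statement) =====
-- stated objective: idiomatic
-- what changed: Replaces three short-circuiting any() scans with a single accumulating pass keeping a running maximum severity rank, mapped back to a status name at the end.
import Mathlib
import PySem

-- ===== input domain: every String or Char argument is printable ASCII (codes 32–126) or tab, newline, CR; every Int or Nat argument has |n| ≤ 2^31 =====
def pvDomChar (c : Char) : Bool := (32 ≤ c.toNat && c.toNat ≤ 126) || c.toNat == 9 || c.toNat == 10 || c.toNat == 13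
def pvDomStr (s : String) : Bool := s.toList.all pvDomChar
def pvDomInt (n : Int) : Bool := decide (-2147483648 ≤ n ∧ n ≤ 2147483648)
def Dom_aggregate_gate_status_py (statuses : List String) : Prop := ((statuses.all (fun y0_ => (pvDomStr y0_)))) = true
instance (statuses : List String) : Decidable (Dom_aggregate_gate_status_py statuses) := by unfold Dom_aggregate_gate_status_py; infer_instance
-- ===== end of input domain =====

-- B replaces A's three short-circuiting scans with one running-max-severity pass (idiomatic).


-- ===== PORT A =====
def aggregate_gate_status_py (statuses : List String) : String :=
  if statuses.any (fun status => status == "ERROR") then "ERROR"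
  else if statuses.any (fun status => status == "FAIL") then "FAIL"
  else if statuses.any (fun status => status == "UNDETERMINED") then "UNDETERMINED"
  else "PASS"

-- ===== PORT B =====
-- _RANK.get(s, 0)
def pvRank (s : String) : Nat :=
  (PySem.Dict.ofList [("ERROR", 3), ("FAIL", 2), ("UNDETERMINED", 1)]).getD s 0

def pvNames : List String := ["PASS", "UNDETERMINED", "FAIL", "ERROR"]

def aggregate_gate_status_py_alt (statuses : List String) : String :=
  let best := statuses.foldl (fun best s => max best (pvRank s)) 0
  pvNames.getD best ""

-- ===== PRECONDITION & SPEC =====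
def Spec_aggregate_gate_status_py (statuses : List String) (out : String) : Prop := out = aggregate_gate_status_py_alt statuses
instance (statuses : List String) (out : String) : Decidable (Spec_aggregate_gate_status_py statuses out) := by unfold Spec_aggregate_gate_status_py; infer_instance

-- ===== CLAIM (what is proved, stated in full; the proofs are below) =====
def Claim_equal_aggregate_gate_status_py : Prop := ∀ (statuses : List String), Dom_aggregate_gate_status_py statuses → Spec_aggregate_gate_status_py statuses (aggregate_gate_status_py statuses)

-- ===== LEMMAS AND PROOFS =====

def pvBest (l : List String) : Nat := l.foldl (fun best s => max best (pvRank s)) 0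

theorem pvBest_acc (l : List String) (b : Nat) :
    l.foldl (fun best s => max best (pvRank s)) b = max b (pvBest l) := by
  induction l generalizing b with
  | nil => simp [pvBest]
  | cons s t ih =>
    simp only [pvBest, List.foldl_cons]
    rw [ih, ih (max 0 (pvRank s))]
    omega

theorem pvBest_cons (s : String) (t : List String) :
    pvBest (s :: t) = max (pvRank s) (pvBest t) := by
  simp only [pvBest, List.foldl_cons, Nat.zero_max]
  exact pvBest_acc t (pvRank s)

theorem pvRank_eq (s : String) :
    pvRank s = (if s = "ERROR" then 3 else if s = "FAIL" then 2
      else if s = "UNDETERMINED" then 1 else 0) := by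
  unfold pvRank
  rw [show (PySem.Dict.ofList [("ERROR", (3:Nat)), ("FAIL", 2), ("UNDETERMINED", 1)])
      = PySem.Dict.mk [("ERROR", 3), ("FAIL", 2), ("UNDETERMINED", 1)] from by decide]
  by_cases h1 : s = "ERROR"
  · simp [h1, PySem.Dict.getD, PySem.Dict.get?_mk_cons]
  · by_cases h2 : s = "FAIL"
    · simp [h1, h2, PySem.Dict.getD, PySem.Dict.get?_mk_cons]
    · by_cases h3 : s = "UNDETERMINED"
      · simp [h1, h2, h3, PySem.Dict.getD, PySem.Dict.get?_mk_cons]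
      · simp [h1, h2, h3, PySem.Dict.getD, PySem.Dict.get?, List.find?,
          show ("ERROR" == s) = false by simp [Ne.symm h1],
          show ("FAIL" == s) = false by simp [Ne.symm h2],
          show ("UNDETERMINED" == s) = false by simp [Ne.symm h3]]

theorem pvBest_char (l : List String) :
    pvBest l = (if l.any (fun s => s == "ERROR") = true then 3
      else if l.any (fun s => s == "FAIL") = true then 2
      else if l.any (fun s => s == "UNDETERMINED") = true then 1 else 0) := by
  induction l with
  | nil => simp [pvBest]
  | cons s t ih =>
    rw [pvBest_cons, pvRank_eq, ih]
    simp only [List.any_cons, Bool.or_eq_true, beq_iff_eq]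
    split_ifs <;> simp_all

theorem pv_main (l : List String) :
    aggregate_gate_status_py l = pvNames.getD (pvBest l) "" := by
  unfold aggregate_gate_status_py
  rw [pvBest_char]
  split_ifs <;> rfl

-- ===== VERDICT (by name: the statement is the Claim_ definition above) =====
theorem aggregate_gate_status_py_spec : Claim_equal_aggregate_gate_status_py := by
  intro statuses _
  unfold Spec_aggregate_gate_status_py aggregate_gate_status_py_alt
  rw [pv_main]
  rfl
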